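-- pv_equiv track=rewrite | github.com/karnikamit/Algos | PE/501.py | no_divisors
-- ===== SOURCE A (Python) =====
-- def no_divisors(num):
--     divisors = range(1, num+1)
--     count = 0
--     for i in divisors:
--         if num % i == 0:
--             count += 1
--     if count == 8:
--         return num
-- ===== SOURCE B (Python) =====
-- def no_divisors(num):
--     # count divisors in pairs (d, num//d) by trial division up to sqrt(num)
--     count = 0
--     i = 1
--     while i * i <= num:
--         if num % i == 0:
--             count += 1 if i * i == num else 2
--         i += 1
--     if count == 8:
--         return num
-- ===== Notes on version B (the rewrite author's own statement) =====
-- stated objective: faster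
-- what changed: counts divisors in symmetric pairs by trial division up to the square root of num, instead of testing every candidate up to num itself
import Mathlib
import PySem

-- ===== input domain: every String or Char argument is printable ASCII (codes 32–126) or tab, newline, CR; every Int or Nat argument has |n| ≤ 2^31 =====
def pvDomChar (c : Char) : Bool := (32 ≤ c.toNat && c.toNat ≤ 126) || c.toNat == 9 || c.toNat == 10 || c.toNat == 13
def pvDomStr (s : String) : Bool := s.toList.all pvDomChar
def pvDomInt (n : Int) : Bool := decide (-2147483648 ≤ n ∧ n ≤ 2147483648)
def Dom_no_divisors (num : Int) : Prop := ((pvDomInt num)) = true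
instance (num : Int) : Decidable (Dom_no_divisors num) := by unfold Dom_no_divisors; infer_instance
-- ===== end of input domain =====

-- B counts divisors by trial division up to sqrt(num) in divisor pairs (asymptotically faster than A's full scan to num).


-- ===== PORT A =====
def no_divisors (num : Int) : Option Int :=
  let divisors := PySem.List.pyRange 1 (num + 1) 1
  let count := divisors.foldl (fun count i => if PySem.Int.mod num i = 0 then count + 1 else count) (0 : Int)
  if count = 8 then some num else none

-- ===== PORT B =====
-- while i * i <= num: …  (terminates since i strictly increases towards num + 1)
def noDivLoop (num i count : Int) : Int :=
  if h : i * i ≤ num then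
    noDivLoop num (i + 1)
      (if PySem.Int.mod num i = 0 then (if i * i = num then count + 1 else count + 2) else count)
  else count
termination_by (num + 1 - i).toNat
decreasing_by
  by_cases hi : i ≤ 0
  · have h0 : (0:Int) ≤ i * i := mul_self_nonneg i
    omega
  · have : i ≤ i * i := le_mul_of_one_le_left (by omega) (by omega)
    omega

def no_divisors_alt (num : Int) : Option Int :=
  let count := noDivLoop num 1 0
  if count = 8 then some num else none

-- ===== PRECONDITION & SPEC =====
def Spec_no_divisors (num : Int) (out : Option Int) : Prop := out = no_divisors_alt num
instance (num : Int) (out : Option Int) : Decidable (Spec_no_divisors num out) := by unfold Spec_no_divisors; infer_instance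

-- ===== CLAIM (what is proved, stated in full; the proofs are below) =====
def Claim_equal_no_divisors : Prop := ∀ (num : Int), Dom_no_divisors num → Spec_no_divisors num (no_divisors num)

-- ===== LEMMAS AND PROOFS =====

-- weight of a candidate j in B's paired count
def pvW (num j : Int) : Int :=
  if PySem.Int.mod num j = 0 then (if j * j = num then 1 else 2) else 0

lemma ico_cons (a b : Int) (h : a < b) :
    Finset.Ico a b = insert a (Finset.Ico (a + 1) b) := by
  ext x; simp only [Finset.mem_Ico, Finset.mem_insert]; omega

lemma foldlA (num : Int) : ∀ (n : Nat) (a c : Int), (num + 1 - a).toNat = n →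
    (PySem.List.pyRange a (num + 1) 1).foldl
      (fun c i => if PySem.Int.mod num i = 0 then c + 1 else c) c
    = c + ∑ j ∈ Finset.Ico a (num + 1), (if PySem.Int.mod num j = 0 then (1:Int) else 0) := by
  intro n
  induction n with
  | zero =>
    intro a c h
    rw [PySem.List.pyRange_one_eq_nil (by omega), Finset.Ico_eq_empty (by omega)]
    simp
  | succ n ih =>
    intro a c h
    have hab : a < num + 1 := by omega
    rw [PySem.List.pyRange_one_cons hab, ico_cons a (num + 1) hab,
      Finset.sum_insert (by simp), List.foldl_cons, ih (a + 1) _ (by omega)]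
    split_ifs <;> ring

lemma loopB_eq : ∀ (num i c : Int), 1 ≤ i →
    noDivLoop num i c = c + ∑ j ∈ Finset.Ico i (num + 1), (if j * j ≤ num then pvW num j else 0) := by
  intro num i c
  induction i, c using noDivLoop.induct num with
  | case1 i c h ih =>
    intro hi
    simp only [dite_eq_ite] at ih
    have hii : i ≤ i * i := le_mul_of_one_le_left (by omega) hi
    have hiu : i < num + 1 := by omega
    rw [noDivLoop, dif_pos h, ih (by omega), ico_cons i (num + 1) hiu,
      Finset.sum_insert (by simp), if_pos h]
    unfold pvW
    split_ifs <;> ring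
  | case2 i c h =>
    intro hi
    rw [noDivLoop, dif_neg h, Finset.sum_eq_zero, add_zero]
    intro j hj
    rw [Finset.mem_Ico] at hj
    have : i * i ≤ j * j := by nlinarith [hj.1]
    rw [if_neg (by omega)]

lemma pairs (num j : Int) (h1 : 1 ≤ num) (hj1 : 1 ≤ j) (hjd : j ∣ num) :
    (num / j) * j = num ∧ 1 ≤ num / j ∧ num / j ∣ num ∧ num / (num / j) = j := by
  have hd : (num / j) * j = num := Int.ediv_mul_cancel hjd
  have hdp : 1 ≤ num / j := by nlinarith
  refine ⟨hd, hdp, ⟨j, hd.symm⟩, ?_⟩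
  have h2 := Int.mul_ediv_cancel_left (a := num / j) (b := j) (by omega)
  rw [hd] at h2
  exact h2

lemma big_card_eq_strict_card (num : Int) (h1 : 1 ≤ num) :
    ((Finset.Ico 1 (num + 1)).filter (fun j => j ∣ num ∧ ¬ j * j ≤ num)).card
    = ((Finset.Ico 1 (num + 1)).filter (fun j => j ∣ num ∧ j * j < num)).card := by
  apply Finset.card_bij' (fun j _ => num / j) (fun j _ => num / j)
  · intro j hj
    simp only [Finset.mem_filter, Finset.mem_Ico] at hj ⊢
    obtain ⟨⟨hjl, hju⟩, hjd, hbig⟩ := hj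
    obtain ⟨hd, hdp, hdd, _⟩ := pairs num j h1 hjl hjd
    refine ⟨⟨hdp, ?_⟩, hdd, ?_⟩
    · nlinarith
    · -- (num/j)^2 < num since j*j > num = (num/j)*j forces num/j < j
      have hlt : num / j < j := by nlinarith
      nlinarith
  · intro j hj
    simp only [Finset.mem_filter, Finset.mem_Ico] at hj ⊢
    obtain ⟨⟨hjl, hju⟩, hjd, hstrict⟩ := hj
    obtain ⟨hd, hdp, hdd, _⟩ := pairs num j h1 hjl hjd
    refine ⟨⟨hdp, ?_⟩, hdd, ?_⟩
    · nlinarith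
    · have hgt : j < num / j := by nlinarith
      nlinarith
  · intro j hj
    simp only [Finset.mem_filter, Finset.mem_Ico] at hj
    exact (pairs num j h1 hj.1.1 hj.2.1).2.2.2
  · intro j hj
    simp only [Finset.mem_filter, Finset.mem_Ico] at hj
    exact (pairs num j h1 hj.1.1 hj.2.1).2.2.2

lemma core (num : Int) (h : 1 ≤ num) :
    (∑ j ∈ Finset.Ico 1 (num + 1), (if PySem.Int.mod num j = 0 then (1:Int) else 0))
    = ∑ j ∈ Finset.Ico 1 (num + 1), (if j * j ≤ num then pvW num j else 0) := by
  unfold pvW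
  simp only [PySem.Int.mod_eq_zero_iff_dvd]
  have hR : ∀ j ∈ Finset.Ico 1 (num + 1),
      (if j * j ≤ num then (if j ∣ num then (if j * j = num then (1:Int) else 2) else 0) else 0)
      = (if j ∣ num ∧ j * j ≤ num then (1:Int) else 0) + (if j ∣ num ∧ j * j < num then 1 else 0) := by
    intro j _
    by_cases hd : j ∣ num <;> simp [hd]
    split_ifs <;> omega
  rw [Finset.sum_congr rfl hR, Finset.sum_add_distrib]
  have cast1 : ∀ (p : Int → Prop) [DecidablePred p],
      (∑ j ∈ Finset.Ico 1 (num + 1), (if p j then (1:Int) else 0))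
      = (((Finset.Ico 1 (num + 1)).filter p).card : Int) := by
    intro p _
    rw [Finset.sum_boole]
  rw [cast1, cast1, cast1, ← big_card_eq_strict_card num h]
  have hsplit := Finset.card_filter_add_card_filter_not
    (s := (Finset.Ico 1 (num + 1)).filter (fun j => j ∣ num))
    (p := fun j => j * j ≤ num)
  rw [Finset.filter_filter, Finset.filter_filter] at hsplit
  omega

-- ===== VERDICT (by name: the statement is the Claim_ definition above) =====
theorem no_divisors_spec : Claim_equal_no_divisors := by
  intro num _
  show no_divisors num = no_divisors_alt num
  simp only [no_divisors, no_divisors_alt]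
  by_cases h : num ≤ 0
  · rw [PySem.List.pyRange_one_eq_nil (by omega), noDivLoop,
      dif_neg (show ¬(1 * 1 : Int) ≤ num by omega)]
    simp
  · rw [foldlA num (num + 1 - 1).toNat 1 0 rfl, loopB_eq num 1 0 le_rfl,
      core num (by omega)]
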